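-- pv_equiv track=rewrite | github.com/eliottcassidy2000/math | 04-computation/gs_specialization.py | typed_indep_poly
-- ===== SOURCE A (Python) =====
-- from collections import Counter, defaultdict
--
-- def conflict_graph_adj(cycles):
--     nc = len(cycles)
--     adj = [[False]*nc for _ in range(nc)]
--     for i in range(nc):
--         for j in range(i+1, nc):
--             if set(cycles[i][0]) & set(cycles[j][0]):
--                 adj[i][j] = adj[j][i] = True
--     return adj
--
-- def enumerate_independent_sets(adj, nc):
--     result = []
--     for mask in range(2**nc):
--         nodes = [i for i in range(nc) if (mask >> i) & 1]
--         ok = True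
--         for a in range(len(nodes)):
--             for b in range(a+1, len(nodes)):
--                 if adj[nodes[a]][nodes[b]]:
--                     ok = False
--                     break
--             if not ok:
--                 break
--         if ok:
--             result.append(nodes)
--     return result
--
-- def typed_indep_poly(cycles, n):
--     """Compute typed independence polynomial.
--     Returns dict: tuple of cycle lengths -> count of independent sets of that type.
--     """
--     nc = len(cycles)
--     if nc == 0:
--         return {(): 1}
--     adj = conflict_graph_adj(cycles)
--     indep = enumerate_independent_sets(adj, nc)
--     result = defaultdict(int)
--     for s in indep:
--         lengths = tuple(sorted([cycles[i][1] for i in s], reverse=True))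
--         result[lengths] += 1
--     return dict(result)
-- ===== SOURCE B (Python) =====
-- def typed_indep_poly(cycles, n):
--     """Compute typed independence polynomial.
--     Returns dict: tuple of cycle lengths -> count of independent sets of that type.
--     Output-sensitive enumeration: extend independent sets vertex by vertex instead
--     of scanning all 2**nc bitmasks; dependent sets are pruned, never visited."""
--     nc = len(cycles)
--     elem_sets = [set(c) for c, _ in cycles]
--     indep = [[]]
--     for k in range(nc):
--         nbrs = {j for j in range(k) if not elem_sets[k].isdisjoint(elem_sets[j])}
--         indep = indep + [s + [k] for s in indep if nbrs.isdisjoint(s)]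
--     result = {}
--     for s in indep:
--         key = tuple(sorted((cycles[i][1] for i in s), reverse=True))
--         result[key] = result.get(key, 0) + 1
--     return result
-- ===== Notes on version B (the rewrite author's own statement) =====
-- stated objective: faster
-- what changed: Replaces A's scan of all 2^nc bitmasks with a quadratic pair-check per mask by an output-sensitive enumeration that extends independent sets one vertex at a time (pruning conflicting extensions via a precomputed neighbour set), producing the same sets in the same order and the same first-occurrence-ordered dict.
import Mathlib
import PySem

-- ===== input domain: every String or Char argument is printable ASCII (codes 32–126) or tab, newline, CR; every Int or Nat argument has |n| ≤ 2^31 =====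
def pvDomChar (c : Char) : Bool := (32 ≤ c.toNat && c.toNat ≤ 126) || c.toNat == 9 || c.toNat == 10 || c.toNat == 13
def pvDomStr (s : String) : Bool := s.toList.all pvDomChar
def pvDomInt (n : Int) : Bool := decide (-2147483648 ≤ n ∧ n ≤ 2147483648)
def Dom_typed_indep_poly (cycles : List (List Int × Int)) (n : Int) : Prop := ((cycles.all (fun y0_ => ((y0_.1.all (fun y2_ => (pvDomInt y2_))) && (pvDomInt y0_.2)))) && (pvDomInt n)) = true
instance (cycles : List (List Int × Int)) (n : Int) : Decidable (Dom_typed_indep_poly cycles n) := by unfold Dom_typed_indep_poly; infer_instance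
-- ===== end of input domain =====

-- B replaces A's scan of all 2^nc bitmasks (with a quadratic pair check per mask) by an
-- output-sensitive enumeration that extends independent sets one vertex at a time, pruning
-- dependent sets; both return the dict in the same first-occurrence key order.

-- ===== PORT A =====
-- truthiness of `set(a) & set(b)` (nonempty intersection)
def pvInterNonempty (a b : List Int) : Bool := !(PySem.Set.inter (PySem.Set.ofList a) b).isEmpty

-- conflict_graph_adj: entry (i, j) of A's matrix — True exactly for i ≠ j with intersecting
-- element sets (A sets adj[i][j] = adj[j][i] for i < j); represented functionally, same values
def pvAdjA (cycles : List (List Int × Int)) (i j : Nat) : Bool :=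
  decide (i ≠ j) && pvInterNonempty (cycles.getD i ([], 0)).1 (cycles.getD j ([], 0)).1

-- nodes = [i for i in range(nc) if (mask >> i) & 1]
def pvNodesOf (nc mask : Nat) : List Nat :=
  (List.range nc).filter (fun i => (mask >>> i) &&& 1 == 1)

-- A's doubly-nested ok check with break: no pair (nodes[a], nodes[b]), a < b, is adjacent
def pvOkA (adj : Nat → Nat → Bool) : List Nat → Bool
  | [] => true
  | a :: rest => rest.all (fun b => !adj a b) && pvOkA adj rest

-- tuple(sorted([cycles[i][1] for i in s], reverse=True)) — the same expression in both Pythons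
def pvKeyOf (cycles : List (List Int × Int)) (s : List Nat) : List Int :=
  PySem.List.sorted (s.map fun i => (cycles.getD i ([], 0)).2) (fun x => x) true

def typed_indep_poly (cycles : List (List Int × Int)) (n : Int) : List (List Int × Int) :=
  let nc := cycles.length
  if nc == 0 then [([], 1)]
  else
    -- enumerate_independent_sets: loop over masks, keep the node list when ok
    let indep := (List.range (2 ^ nc)).filterMap (fun mask =>
      let nodes := pvNodesOf nc mask
      if pvOkA (pvAdjA cycles) nodes then some nodes else none)
    -- defaultdict(int): result[lengths] += 1, then dict(result)
    (indep.foldl (fun d s => d.modify (pvKeyOf cycles s) 0 (· + 1)) PySem.Dict.empty).items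

-- ===== PORT B =====
-- one step of B's loop: nbrs = {j < k conflicting with k}; keep sets disjoint from nbrs, extend by k
def pvStepB (elemSets : List (PySem.Set Int)) (acc : List (List Nat)) (k : Nat) : List (List Nat) :=
  let nbrs : PySem.Set Nat := PySem.Set.ofList ((List.range k).filter
    (fun j => !PySem.Set.isdisjoint (elemSets.getD k []) (elemSets.getD j [])))
  acc ++ (acc.filter (fun s => PySem.Set.isdisjoint nbrs s)).map (fun s => s ++ [k])

def typed_indep_poly_alt (cycles : List (List Int × Int)) (n : Int) : List (List Int × Int) :=
  let nc := cycles.length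
  let elemSets := cycles.map (fun c => PySem.Set.ofList c.1)
  let indep := (List.range nc).foldl (pvStepB elemSets) [[]]
  -- result[key] = result.get(key, 0) + 1
  (indep.foldl (fun d s =>
    let key := pvKeyOf cycles s
    d.insert key (d.getD key 0 + 1)) PySem.Dict.empty).items

-- ===== PRECONDITION & SPEC =====
def Spec_typed_indep_poly (cycles : List (List Int × Int)) (n : Int) (out : List (List Int × Int)) : Prop := out = typed_indep_poly_alt cycles n
instance (cycles : List (List Int × Int)) (n : Int) (out : List (List Int × Int)) : Decidable (Spec_typed_indep_poly cycles n out) := by unfold Spec_typed_indep_poly; infer_instance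

-- ===== CLAIM (what is proved, stated in full; the proofs are below) =====
def Claim_equal_typed_indep_poly : Prop := ∀ (cycles : List (List Int × Int)) (n : Int), Dom_typed_indep_poly cycles n → Spec_typed_indep_poly cycles n (typed_indep_poly cycles n)

-- ===== LEMMAS AND PROOFS =====

-- members of a node list are < nc
theorem pv_mem_nodesOf {i nc m : Nat} (h : i ∈ pvNodesOf nc m) : i < nc := by
  unfold pvNodesOf at h
  exact List.mem_range.mp (List.mem_filter.mp h).1

-- the bit test is testBit
theorem pv_bit_eq (m i : Nat) : ((m >>> i) &&& 1 == 1) = Nat.testBit m i := by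
  simp [Nat.testBit]

-- a mask below 2^k has no bit at k: widening nc from k to k+1 adds nothing
theorem pvNodesOf_succ_lt {k m : Nat} (h : m < 2 ^ k) :
    pvNodesOf (k + 1) m = pvNodesOf k m := by
  unfold pvNodesOf
  rw [List.range_succ, List.filter_append]
  have hb : m >>> k % 2 = 0 := by
    have hb0 : (m >>> k &&& 1 == 1) = false := by
      rw [pv_bit_eq]; exact Nat.testBit_lt_two_pow h
    rw [Nat.and_one_is_mod] at hb0
    simp at hb0
    omega
  simp [hb]

-- mask 2^k + m (m < 2^k): same low bits as m, bit k set
theorem pvNodesOf_succ_add {k m : Nat} (h : m < 2 ^ k) :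
    pvNodesOf (k + 1) (2 ^ k + m) = pvNodesOf k m ++ [k] := by
  unfold pvNodesOf
  rw [List.range_succ, List.filter_append]
  have hbk : ((2 ^ k + m) >>> k &&& 1 == 1) = true := by
    rw [pv_bit_eq, Nat.testBit_two_pow_add_eq, Nat.testBit_lt_two_pow h]; rfl
  have hlow : ∀ i ∈ List.range k,
      ((2 ^ k + m) >>> i &&& 1 == 1) = (m >>> i &&& 1 == 1) := by
    intro i hi
    rw [pv_bit_eq, pv_bit_eq, Nat.testBit_two_pow_add_gt (List.mem_range.mp hi) m]
  have hbk' : (2 ^ k + m) >>> k % 2 = 1 := by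
    rw [Nat.and_one_is_mod] at hbk
    simpa using hbk
  rw [List.filter_congr hlow]
  simp [hbk']

-- A's pair check on s ++ [k]: check on s, plus k against every member of s
theorem pvOkA_append (adj : Nat → Nat → Bool) (s : List Nat) (k : Nat) :
    pvOkA adj (s ++ [k]) = (pvOkA adj s && s.all (fun j => !adj j k)) := by
  induction s with
  | nil => simp [pvOkA]
  | cons a t ih =>
    simp only [List.cons_append, pvOkA, List.all_append, List.all_cons, List.all_nil, ih]
    cases adj a k <;> cases pvOkA adj t <;> cases t.all (fun b => !adj a b) <;>
      cases t.all (fun j => !adj j k) <;> rfl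

-- factor a fused filterMap into filterMap, filter, map
theorem pv_filterMap_factor {α β : Type} (l : List α) (f : α → β) (p : α → Bool)
    (q : β → Bool) (g : β → β) :
    l.filterMap (fun m => if p m && q (f m) then some (g (f m)) else none)
    = ((l.filterMap (fun m => if p m then some (f m) else none)).filter q).map g := by
  induction l with
  | nil => rfl
  | cons x t ih =>
    rw [List.filterMap_cons, List.filterMap_cons]
    cases hp : p x with
    | false =>
      rw [if_neg (show ¬((false && q (f x)) = true) by simp),
        if_neg (show ¬((false : Bool) = true) by simp), ih]
    | true =>
      cases hq : q (f x) with
      | false =>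
        rw [if_neg (show ¬((true && false) = true) by simp),
          if_pos (show (true : Bool) = true from rfl), ih,
          List.filter_cons_of_neg (Bool.eq_false_iff.mp hq)]
      | true =>
        rw [if_pos (show ((true && true : Bool)) = true from rfl),
          if_pos (show (true : Bool) = true from rfl), ih,
          List.filter_cons_of_pos hq, List.map_cons]

-- elem_sets[j] is set(cycles[j][0]) (both defaulting to the empty set out of range)
theorem pv_elemSets_getD (cycles : List (List Int × Int)) (j : Nat) :
    (cycles.map (fun c => PySem.Set.ofList c.1)).getD j []
    = PySem.Set.ofList ((cycles.getD j ([], 0)).1) := by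
  simp only [List.getD_eq_getElem?_getD, List.getElem?_map]
  cases h : cycles[j]? <;> simp [PySem.Set.ofList]

-- nonempty intersection as a proposition
theorem pv_interNonempty_iff (a b : List Int) :
    pvInterNonempty a b = true ↔ ∃ x, x ∈ a ∧ x ∈ b := by
  unfold pvInterNonempty
  rw [Bool.not_eq_eq_eq_not, Bool.not_true, List.isEmpty_eq_false_iff_exists_mem]
  constructor
  · rintro ⟨x, hx⟩
    have := (PySem.Set.mem_inter _ _ _).mp hx
    exact ⟨x, (PySem.Set.mem_ofList _ _).mp this.1, this.2⟩
  · rintro ⟨x, hxa, hxb⟩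
    exact ⟨x, (PySem.Set.mem_inter _ _ _).mpr ⟨(PySem.Set.mem_ofList _ _).mpr hxa, hxb⟩⟩

-- B's conflict test between cycles k and j, as a proposition
theorem pv_conflict_iff (cycles : List (List Int × Int)) (k j : Nat) :
    (!PySem.Set.isdisjoint
        ((cycles.map (fun c => PySem.Set.ofList c.1)).getD k [])
        ((cycles.map (fun c => PySem.Set.ofList c.1)).getD j [])) = true
    ↔ ∃ x, x ∈ (cycles.getD k ([], 0)).1 ∧ x ∈ (cycles.getD j ([], 0)).1 := by
  rw [pv_elemSets_getD, pv_elemSets_getD, Bool.not_eq_eq_eq_not, Bool.not_true,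
    Bool.eq_false_iff, Ne, PySem.Set.isdisjoint_iff]
  push Not
  constructor
  · rintro ⟨x, hxk, hxj⟩
    exact ⟨x, (PySem.Set.mem_ofList _ _).mp hxk, (PySem.Set.mem_ofList _ _).mp hxj⟩
  · rintro ⟨x, hxk, hxj⟩
    exact ⟨x, (PySem.Set.mem_ofList _ _).mpr hxk, (PySem.Set.mem_ofList _ _).mpr hxj⟩

-- A's "no member of s adjacent to k" coincides with B's "s disjoint from nbrs of k",
-- for s whose members are < k
theorem pv_cond_eq (cycles : List (List Int × Int)) (k : Nat) (s : List Nat)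
    (hs : ∀ j ∈ s, j < k) :
    (s.all fun j => !pvAdjA cycles j k)
    = PySem.Set.isdisjoint (PySem.Set.ofList ((List.range k).filter
        (fun j => !PySem.Set.isdisjoint
          ((cycles.map (fun c => PySem.Set.ofList c.1)).getD k [])
          ((cycles.map (fun c => PySem.Set.ofList c.1)).getD j [])))) s := by
  rw [Bool.eq_iff_iff, List.all_eq_true, PySem.Set.isdisjoint_iff]
  constructor
  · intro h j hj hjs
    rcases List.mem_filter.mp ((PySem.Set.mem_ofList _ _).mp hj) with ⟨hjr, hconf⟩
    rcases (pv_conflict_iff cycles k j).mp hconf with ⟨x, hxk, hxj⟩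
    have hadj : (!pvAdjA cycles j k) = true := h j hjs
    rw [Bool.not_eq_eq_eq_not, Bool.not_true, pvAdjA, Bool.and_eq_false_iff] at hadj
    rcases hadj with h1 | h2
    · have hje : j = k := by simpa using h1
      have := List.mem_range.mp hjr
      omega
    · exact absurd ((pv_interNonempty_iff _ _).mpr ⟨x, hxj, hxk⟩)
        (Bool.eq_false_iff.mp h2)
  · intro h j hjs
    have hjk : j < k := hs j hjs
    rw [Bool.not_eq_eq_eq_not, Bool.not_true, pvAdjA, Bool.and_eq_false_iff]
    by_cases hc : pvInterNonempty (cycles.getD j ([], 0)).1 (cycles.getD k ([], 0)).1 = true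
    · exfalso
      rcases (pv_interNonempty_iff _ _).mp hc with ⟨x, hxj, hxk⟩
      have hjmem : j ∈ PySem.Set.ofList ((List.range k).filter
          (fun j => !PySem.Set.isdisjoint
            ((cycles.map (fun c => PySem.Set.ofList c.1)).getD k [])
            ((cycles.map (fun c => PySem.Set.ofList c.1)).getD j []))) := by
        rw [PySem.Set.mem_ofList, List.mem_filter]
        exact ⟨List.mem_range.mpr hjk, (pv_conflict_iff cycles k j).mpr ⟨x, hxk, hxj⟩⟩
      exact h j hjmem hjs
    · right
      exact Bool.eq_false_iff.mpr hc

-- main loop invariant: A's mask enumeration over 2^k equals B's k-step extension loop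
theorem pvMain (cycles : List (List Int × Int)) (k : Nat) :
    (List.range (2 ^ k)).filterMap (fun mask =>
      let nodes := pvNodesOf k mask
      if pvOkA (pvAdjA cycles) nodes then some nodes else none)
    = (List.range k).foldl (pvStepB (cycles.map (fun c => PySem.Set.ofList c.1))) [[]] := by
  induction k with
  | zero => rfl
  | succ k ih =>
    have h2 : 2 ^ (k + 1) = 2 ^ k + 2 ^ k := by rw [pow_succ, Nat.mul_two]
    rw [h2, List.range_add, List.filterMap_append, List.range_succ, List.foldl_append,
      List.foldl_cons, List.foldl_nil]
    -- low half: masks < 2^k have no bit k, so nodes are as for width k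
    have hlow : (List.range (2 ^ k)).filterMap (fun mask =>
        let nodes := pvNodesOf (k + 1) mask
        if pvOkA (pvAdjA cycles) nodes then some nodes else none)
      = (List.range (2 ^ k)).filterMap (fun mask =>
        let nodes := pvNodesOf k mask
        if pvOkA (pvAdjA cycles) nodes then some nodes else none) := by
      apply List.filterMap_congr
      intro m hm
      simp only [pvNodesOf_succ_lt (List.mem_range.mp hm)]
    -- high half: masks 2^k + m append node k; split the fused check
    have hhigh : ((List.range (2 ^ k)).map (2 ^ k + ·)).filterMap (fun mask =>
        let nodes := pvNodesOf (k + 1) mask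
        if pvOkA (pvAdjA cycles) nodes then some nodes else none)
      = (List.range (2 ^ k)).filterMap (fun m =>
          if pvOkA (pvAdjA cycles) (pvNodesOf k m)
              && ((pvNodesOf k m).all fun j => !pvAdjA cycles j k) then
            some (pvNodesOf k m ++ [k]) else none) := by
      rw [List.filterMap_map]
      apply List.filterMap_congr
      intro m hm
      simp only [Function.comp_apply, pvNodesOf_succ_add (List.mem_range.mp hm),
        pvOkA_append]
    rw [hlow, hhigh, ih,
      pv_filterMap_factor (List.range (2 ^ k)) (pvNodesOf k) (fun m => pvOkA (pvAdjA cycles) (pvNodesOf k m)) (fun s => s.all fun j => !pvAdjA cycles j k) (fun s => s ++ [k])]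
    -- replace A's extension test by B's nbrs-disjointness test on the enumerated sets
    have hfilter : ((List.range (2 ^ k)).filterMap (fun m =>
          if pvOkA (pvAdjA cycles) (pvNodesOf k m) then some (pvNodesOf k m) else none)).filter
        (fun s => s.all fun j => !pvAdjA cycles j k)
      = ((List.range (2 ^ k)).filterMap (fun m =>
          if pvOkA (pvAdjA cycles) (pvNodesOf k m) then some (pvNodesOf k m) else none)).filter
        (fun s => PySem.Set.isdisjoint (PySem.Set.ofList ((List.range k).filter
          (fun j => !PySem.Set.isdisjoint
            ((cycles.map (fun c => PySem.Set.ofList c.1)).getD k [])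
            ((cycles.map (fun c => PySem.Set.ofList c.1)).getD j [])))) s) := by
      apply List.filter_congr
      intro s hsmem
      rcases List.mem_filterMap.mp hsmem with ⟨m, _, hsome⟩
      have hs : ∀ j ∈ s, j < k := by
        intro j hj
        rcases (by split at hsome <;> simp_all : s = pvNodesOf k m) with rfl
        exact pv_mem_nodesOf hj
      exact pv_cond_eq cycles k s hs
    rw [hfilter, ih]
    rfl

-- the two grouping loops build the same dict (both are Counter of the key list)
theorem pvGroup_eq (cycles : List (List Int × Int)) (l : List (List Nat)) :
    l.foldl (fun d s => d.modify (pvKeyOf cycles s) 0 (· + 1))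
        (PySem.Dict.empty : PySem.Dict (List Int) Int)
    = l.foldl (fun d s =>
        let key := pvKeyOf cycles s
        d.insert key (d.getD key 0 + 1))
        (PySem.Dict.empty : PySem.Dict (List Int) Int) := by
  have h : (fun (d : PySem.Dict (List Int) Int) (s : List Nat) =>
        d.modify (pvKeyOf cycles s) 0 (· + 1))
      = (fun (d : PySem.Dict (List Int) Int) (s : List Nat) =>
        let key := pvKeyOf cycles s
        d.insert key (d.getD key 0 + 1)) := by
    funext d s
    simp [PySem.Dict.modify]
  exact congrArg (fun f => l.foldl f (PySem.Dict.empty : PySem.Dict (List Int) Int)) h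

-- ===== VERDICT (by name: the statement is the Claim_ definition above) =====
theorem typed_indep_poly_spec : Claim_equal_typed_indep_poly := by
  intro cycles n _
  unfold Spec_typed_indep_poly
  cases cycles with
  | nil => rfl
  | cons c cs =>
    unfold typed_indep_poly typed_indep_poly_alt
    simp only [List.length_cons]
    rw [if_neg (show ¬((cs.length + 1 == 0) = true) by simp)]
    rw [pvMain (c :: cs) (cs.length + 1)]
    exact congrArg PySem.Dict.items (pvGroup_eq (c :: cs) _)
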